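-- pv_equiv track=rewrite | github.com/Perrtyk/python | lab_6_strings/Problem_1.py | find_multi_con
-- ===== SOURCE A (Python) =====
-- def find_multi_con(word):
--     """
--     Looks if word starts with a multi-consonant.
--     :param word:
--     :return: True/False
--     """
--     vowel_list = ['a', 'e', 'i', 'o', 'u']
--     num_consonants = 0
--     for char in word:
--         if char in vowel_list:
--             return False
--         num_consonants += 1
--     return num_consonants >= 2
-- ===== SOURCE B (Python) =====
-- def find_multi_con(word):
--     # Inverted traversal: scan the five vowels, substring-test each against the word.
--     for vowel in 'aeiou':
--         if vowel in word:
--             return False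
--     return len(word) >= 2
-- ===== Notes on version B (the rewrite author's own statement) =====
-- stated objective: alternative
-- what changed: Inverted the traversal: instead of A's single pass over the word's characters with a consonant counter and early return on a vowel, B loops over the five vowels and substring-tests each against the whole word, then checks the length; correct because A returns True iff the word is vowel-free and has length >= 2.
import Mathlib
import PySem

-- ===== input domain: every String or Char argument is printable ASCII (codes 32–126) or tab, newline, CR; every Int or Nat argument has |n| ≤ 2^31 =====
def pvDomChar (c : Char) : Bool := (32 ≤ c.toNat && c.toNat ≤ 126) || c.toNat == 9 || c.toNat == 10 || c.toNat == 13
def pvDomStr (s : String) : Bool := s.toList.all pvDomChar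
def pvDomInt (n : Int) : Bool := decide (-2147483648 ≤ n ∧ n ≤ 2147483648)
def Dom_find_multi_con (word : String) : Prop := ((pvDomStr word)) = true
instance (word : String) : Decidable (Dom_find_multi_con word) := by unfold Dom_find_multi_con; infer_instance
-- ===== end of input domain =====

-- B inverts the traversal: it loops over the five vowels, substring-testing each against
-- the word, instead of A's per-character scan with a consonant counter (alternative).

-- ===== PORT A =====
-- A's for-loop over the word's characters: early 'return False' on a vowel, else count
def find_multi_con_loop : List Char → Int → Bool
  | [], num_consonants => decide (num_consonants ≥ 2)
  | c :: cs, num_consonants =>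
      if c ∈ ['a', 'e', 'i', 'o', 'u'] then false
      else find_multi_con_loop cs (num_consonants + 1)

def find_multi_con (word : String) : Bool :=
  find_multi_con_loop word.toList 0

-- ===== PORT B =====
-- B's for-loop over the vowels: early 'return False' if the vowel occurs in the word
-- ('vowel in word' is Python substring search, ported exactly as PySem.Chars.isIn)
def find_multi_con_alt_loop : List Char → List Char → Bool
  | [], w => decide (w.length ≥ 2)
  | v :: vs, w =>
      if PySem.Chars.isIn [v] w then false
      else find_multi_con_alt_loop vs w

def find_multi_con_alt (word : String) : Bool :=
  find_multi_con_alt_loop "aeiou".toList word.toList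

-- ===== PRECONDITION & SPEC =====
def Spec_find_multi_con (word : String) (out : Bool) : Prop := out = find_multi_con_alt word
instance (word : String) (out : Bool) : Decidable (Spec_find_multi_con word out) := by unfold Spec_find_multi_con; infer_instance

-- ===== CLAIM (what is proved, stated in full; the proofs are below) =====
def Claim_equal_find_multi_con : Prop := ∀ (word : String), Dom_find_multi_con word → Spec_find_multi_con word (find_multi_con word)

-- ===== LEMMAS AND PROOFS =====

theorem hv5 : "aeiou".toList = ['a', 'e', 'i', 'o', 'u'] := by decide

-- A's loop: False iff a vowel occurs; otherwise the count reaches n + length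
theorem find_multi_con_loop_char (cs : List Char) (n : Int) :
    find_multi_con_loop cs n =
      (decide (∀ c ∈ cs, c ∉ ['a', 'e', 'i', 'o', 'u']) &&
        decide (n + cs.length ≥ 2)) := by
  induction cs generalizing n with
  | nil => simp [find_multi_con_loop]
  | cons c cs ih =>
      by_cases h : c ∈ ['a', 'e', 'i', 'o', 'u']
      · simp only [find_multi_con_loop, if_pos h]
        simp only [List.mem_cons, List.not_mem_nil, or_false] at h
        rcases h with h | h | h | h | h <;> subst h <;> simp
      · simp only [find_multi_con_loop, if_neg h, ih]
        simp only [List.mem_cons, List.not_mem_nil, not_or, or_false] at h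
        obtain ⟨h1, h2, h3, h4, h5⟩ := h
        have hn : n + 1 + (cs.length : Int) = n + ((cs.length : Int) + 1) := by ring
        rw [hn]
        simp [h1, h2, h3, h4, h5]

-- B's loop: False iff one of the vowels in vs occurs in the word
theorem find_multi_con_alt_loop_char (vs w : List Char) :
    find_multi_con_alt_loop vs w =
      (decide (∀ v ∈ vs, v ∉ w) && decide (w.length ≥ 2)) := by
  induction vs with
  | nil => simp [find_multi_con_alt_loop]
  | cons v vs ih =>
      by_cases h : PySem.Chars.isIn [v] w
      · have hv : v ∈ w := (List.singleton_infix_iff v w).mp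
          ((PySem.Chars.isIn_iff_infix [v] w).mp h)
        simp [find_multi_con_alt_loop, h, hv]
      · have hv : v ∉ w := fun hm =>
          h ((PySem.Chars.isIn_iff_infix [v] w).mpr ((List.singleton_infix_iff v w).mpr hm))
        simp [find_multi_con_alt_loop, h, ih, hv]

-- ===== VERDICT (by name: the statement is the Claim_ definition above) =====
theorem find_multi_con_spec : Claim_equal_find_multi_con := by
  intro word _
  show find_multi_con word = find_multi_con_alt word
  unfold find_multi_con find_multi_con_alt
  rw [find_multi_con_loop_char, find_multi_con_alt_loop_char, hv5]
  rw [Bool.eq_iff_iff]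
  simp only [Bool.and_eq_true, decide_eq_true_iff]
  constructor
  · rintro ⟨h, hl⟩
    exact ⟨fun v hv hvw => h v hvw hv, by omega⟩
  · rintro ⟨h, hl⟩
    exact ⟨fun c hc hcv => h c hcv hc, by omega⟩
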